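-- pv_equiv track=rewrite | github.com/Goob-Station/Goob-Station | Tools/update_pr_reuse_headers.py | remove_existing_reuse_header
-- ===== SOURCE A (Python) =====
-- def remove_existing_reuse_header(content, comment_prefix):
--     """Removes existing SPDX comment lines from the start of the content."""
--     lines = content.splitlines()
--     cleaned_lines = []
--     in_header = True
--     header_removed = False
--     spdx_prefix = f"{comment_prefix} SPDX-"
--     copyright_prefix_long = f"{comment_prefix} SPDX-FileCopyrightText:"
--     copyright_prefix_short = f"{comment_prefix} Copyright"
--     separator = f"{comment_prefix}"
--
--     for i, line in enumerate(lines):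
--         stripped_line = line.strip()
--         is_spdx_comment = stripped_line.startswith(spdx_prefix)
--         is_copyright_comment = stripped_line.startswith(copyright_prefix_long) or stripped_line.startswith(copyright_prefix_short)
--         is_separator_comment = stripped_line == separator and i < 5 # Only consider separators early on
--         is_header_line = is_spdx_comment or is_copyright_comment or is_separator_comment
--
--         if in_header and is_header_line:
--             header_removed = True
--             continue
--         # Stop considering it a header if we hit a non-header line or go too deep
--         if in_header and (not is_header_line or i >= 50):
--              in_header = False
--         cleaned_lines.append(line)
--
--     # Trim leading whitespace after removing header
--     first_content_line_index = 0
--     for i, line in enumerate(cleaned_lines):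
--         if line.strip():
--             first_content_line_index = i
--             break
--
--     return "\n".join(cleaned_lines[first_content_line_index:]) if cleaned_lines else ""
-- ===== SOURCE B (Python) =====
-- def remove_existing_reuse_header(content, comment_prefix):
--     """Removes existing SPDX comment lines from the start of the content."""
--     # Work on one normalized string instead of a list of lines: peel header
--     # lines off the front of the string itself, then cut the leading
--     # whitespace run back to its enclosing line start by string arithmetic.
--     s = "\n".join(content.splitlines())
--     i = 0
--     while s:
--         nl = s.find("\n")
--         line = s if nl < 0 else s[:nl]
--         t = line.strip()
--         if not (t.startswith(comment_prefix + " SPDX-")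
--                 or t.startswith(comment_prefix + " Copyright")
--                 or (t == comment_prefix and i < 5)):
--             break
--         s = "" if nl < 0 else s[nl + 1:]
--         i += 1
--     p = len(s) - len(s.lstrip())
--     if p == len(s):
--         return s
--     q = p
--     while q > 0 and s[q - 1] != "\n":
--         q -= 1
--     return s[q:]
-- ===== Notes on version B (the rewrite author's own statement) =====
-- stated objective: alternative
-- what changed: A builds a list of kept lines with in_header/header_removed flags and then scans that list for the first non-blank line; B never keeps a line list: it normalizes the text to one string, peels header lines off the front of the string itself (find/slice on the raw text), and removes the leading blank-line run by pure string arithmetic (length of the whitespace run via lstrip, then a backward scan to the enclosing line start).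
import Mathlib
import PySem

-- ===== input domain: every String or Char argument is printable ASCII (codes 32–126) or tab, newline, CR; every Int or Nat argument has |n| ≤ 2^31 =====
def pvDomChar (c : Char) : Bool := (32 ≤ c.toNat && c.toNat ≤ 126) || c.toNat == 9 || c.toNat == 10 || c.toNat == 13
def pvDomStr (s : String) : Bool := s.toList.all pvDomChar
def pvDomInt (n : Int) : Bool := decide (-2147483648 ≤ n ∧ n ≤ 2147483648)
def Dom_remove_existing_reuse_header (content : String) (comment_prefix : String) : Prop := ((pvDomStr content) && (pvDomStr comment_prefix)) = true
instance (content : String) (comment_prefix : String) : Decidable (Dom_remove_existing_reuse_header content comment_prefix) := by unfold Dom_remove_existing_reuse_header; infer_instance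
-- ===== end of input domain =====

-- B replaces A's kept-lines list with flag state (and its list scan for the first
-- non-blank line) by string surgery on one normalized string: peel header lines off
-- the front with find/slice, then cut the leading whitespace run back to its
-- enclosing line start by length arithmetic and a backward scan; objective: alternative.

-- ===== PORT A =====
-- header predicate of A's loop body (the three `is_*` booleans), lifted as a helper
def pvIsHeaderA (pfx : String) (i : Int) (line : String) : Bool :=
  let stripped := PySem.Str.strip line
  let is_spdx := PySem.Str.startswith stripped (pfx ++ " SPDX-")
  let is_copy := PySem.Str.startswith stripped (pfx ++ " SPDX-FileCopyrightText:")
               || PySem.Str.startswith stripped (pfx ++ " Copyright")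
  let is_sep := stripped == pfx && decide (i < 5)
  is_spdx || is_copy || is_sep

-- the body of A's for-loop (state = (cleaned_lines, in_header, header_removed))
def pvStepA (pfx : String) (st : List String × Bool × Bool) (il : Int × String) : List String × Bool × Bool :=
  let is_header := pvIsHeaderA pfx il.1 il.2
  if st.2.1 && is_header then (st.1, st.2.1, true)
  else
    let in_header' := if st.2.1 && (!is_header || decide (50 ≤ il.1)) then false else st.2.1
    (st.1 ++ [il.2], in_header', st.2.2)

-- A's second loop: first index whose line strips non-empty (0 when none)
def pvFirstContentA : List String → Nat → Nat
  | [], _ => 0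
  | l :: ls, i => if !(PySem.Str.strip l).toList.isEmpty then i else pvFirstContentA ls (i + 1)

def remove_existing_reuse_header (content : String) (comment_prefix : String) : String :=
  let lines := PySem.Str.splitlines content
  let st := (PySem.List.enumerate lines).foldl (pvStepA comment_prefix) ([], true, false)
  let cleaned := st.1
  let idx := pvFirstContentA cleaned 0
  if cleaned.isEmpty then "" else PySem.Str.join "\n" (cleaned.drop idx)

-- ===== PORT B =====
-- B's header test on the stripped first line t (string concatenation on char lists)
def pvHeaderTestB (pfx : List Char) (i : Int) (t : List Char) : Bool :=
  PySem.Chars.startswith t (pfx ++ " SPDX-".toList)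
  || PySem.Chars.startswith t (pfx ++ " Copyright".toList)
  || (t == pfx && decide (i < 5))

-- B's while loop: peel header lines off the front of the string s
def pvPeelB (pfx : List Char) (i : Int) (s : List Char) : List Char :=
  if s.isEmpty then s            -- 'while s:' exits
  else
    let nl := PySem.Chars.find s ['\n']
    let line := if nl < 0 then s else PySem.Chars.slice s none (some nl)
    let t := PySem.Chars.strip line
    if pvHeaderTestB pfx i t then
      if nl < 0 then []          -- s = ""; the next 'while s:' test ends the loop
      else pvPeelB pfx (i + 1) (PySem.Chars.slice s (some (nl + 1)) none)
    else s
termination_by s.length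
decreasing_by
  rename_i hne _ hnl
  rw [PySem.Chars.slice_eq_listSlice, PySem.List.slice_from _ (by omega)]
  simp only [List.length_drop]
  have : s.length ≠ 0 := by simpa [List.isEmpty_iff_length_eq_zero] using hne
  omega

-- B's backward while loop 'while q > 0 and s[q-1] != "\n": q -= 1'
-- (s[q-1]? is exact: the loop only reads indices with 1 ≤ q ≤ len(s))
def pvBackB (s : List Char) : Nat → Nat
  | 0 => 0
  | q + 1 => if s[q]? == some '\n' then q + 1 else pvBackB s q

def remove_existing_reuse_header_alt (content : String) (comment_prefix : String) : String :=
  let s0 := PySem.Chars.join ['\n'] (PySem.Chars.splitlines content.toList)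
  let s := pvPeelB comment_prefix.toList 0 s0
  let p := s.length - (PySem.Chars.lstrip s).length
  if p = s.length then String.ofList s
  else String.ofList (List.drop (pvBackB s p) s)   -- s[q:], exact since 0 ≤ q

-- ===== PRECONDITION & SPEC =====
def Spec_remove_existing_reuse_header (content : String) (comment_prefix : String) (out : String) : Prop := out = remove_existing_reuse_header_alt content comment_prefix
instance (content : String) (comment_prefix : String) (out : String) : Decidable (Spec_remove_existing_reuse_header content comment_prefix out) := by unfold Spec_remove_existing_reuse_header; infer_instance

-- ===== CLAIM (what is proved, stated in full; the proofs are below) =====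
def Claim_equal_remove_existing_reuse_header : Prop := ∀ (content : String) (comment_prefix : String), Dom_remove_existing_reuse_header content comment_prefix → Spec_remove_existing_reuse_header content comment_prefix (remove_existing_reuse_header content comment_prefix)

-- ===== LEMMAS AND PROOFS =====

-- char-level header predicate on a raw line, and the leading-header-run counter
def pvHdrC (pfx : List Char) (i : Int) (l : List Char) : Bool :=
  pvHeaderTestB pfx i (PySem.Chars.strip l)

def pvBoundC (pfx : List Char) : Int → List (List Char) → Nat
  | _, [] => 0
  | i, l :: ls => if pvHdrC pfx i l then pvBoundC pfx (i + 1) ls + 1 else 0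

-- String-level boundary of A's loop
def pvBoundA (pfx : String) (i : Int) : List String → Nat
  | [] => 0
  | l :: ls => if pvIsHeaderA pfx i l then pvBoundA pfx (i + 1) ls + 1 else 0

-- once in_header is false, A's loop appends every remaining line
theorem pvStepA_false (pfx : String) (ls : List String) (i0 : Int) (acc : List String) (hr : Bool) :
    (PySem.List.enumerate ls i0).foldl (pvStepA pfx) (acc, false, hr) = (acc ++ ls, false, hr) := by
  induction ls generalizing i0 acc with
  | nil => simp [PySem.List.enumerate]
  | cons l ls ih =>
    rw [PySem.List.enumerate_cons, List.foldl_cons]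
    have : pvStepA pfx (acc, false, hr) (i0, l) = (acc ++ [l], false, hr) := by
      simp [pvStepA]
    rw [this, ih]
    simp

-- A's loop from in_header = true keeps exactly the lines past the boundary
theorem pvStepA_true (pfx : String) (ls : List String) (i0 : Int) (acc : List String) (hr : Bool) :
    ((PySem.List.enumerate ls i0).foldl (pvStepA pfx) (acc, true, hr)).1
      = acc ++ ls.drop (pvBoundA pfx i0 ls) := by
  induction ls generalizing i0 acc hr with
  | nil => simp [PySem.List.enumerate, pvBoundA]
  | cons l ls ih =>
    rw [PySem.List.enumerate_cons, List.foldl_cons]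
    by_cases h : pvIsHeaderA pfx i0 l = true
    · have hs : pvStepA pfx (acc, true, hr) (i0, l) = (acc, true, true) := by
        simp [pvStepA, h]
      rw [hs, ih, pvBoundA, if_pos h, List.drop_succ_cons]
    · simp only [Bool.not_eq_true] at h
      have hs : pvStepA pfx (acc, true, hr) (i0, l) = (acc ++ [l], false, hr) := by
        simp [pvStepA, h]
      rw [hs, pvStepA_false, pvBoundA, if_neg (by simp [h])]
      simp

-- A's first-content scan is findIdx?-with-default-0
theorem pvFirstContent_eq (ls : List String) (i : Nat) :
    pvFirstContentA ls i
      = match ls.findIdx? (fun l => !(PySem.Str.strip l).toList.isEmpty) with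
        | some j => i + j
        | none => 0 := by
  induction ls generalizing i with
  | nil => simp [pvFirstContentA]
  | cons l ls ih =>
    cases h : (!(PySem.Str.strip l).toList.isEmpty) with
    | true =>
      simp only [pvFirstContentA, List.findIdx?_cons, h, if_true]
      simp
    | false =>
      simp only [pvFirstContentA, List.findIdx?_cons, h, Bool.false_eq_true, if_false, ih]
      cases hf : ls.findIdx? (fun l => !(PySem.Str.strip l).toList.isEmpty) with
      | none => simp
      | some j => simp only [Option.map_some]; ac_rfl

-- A's long-copyright test is subsumed by its SPDX- test
theorem pvSubsumed (t pfx : List Char)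
    (h : PySem.Chars.startswith t (pfx ++ " SPDX-FileCopyrightText:".toList) = true) :
    PySem.Chars.startswith t (pfx ++ " SPDX-".toList) = true := by
  rw [PySem.Chars.startswith_iff] at h ⊢
  refine List.IsPrefix.trans ?_ h
  exact (List.prefix_append_right_inj pfx).mpr (by decide)

-- A's header predicate is B's, on the character level
theorem pvPredEq (pfx : String) (i : Int) (l : String) :
    pvIsHeaderA pfx i l = pvHdrC pfx.toList i l.toList := by
  simp only [pvIsHeaderA, pvHdrC, pvHeaderTestB, PySem.Str.startswith_eq,
    String.toList_append, PySem.Str.toList_strip]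
  have hbe : (PySem.Str.strip l == pfx) = (PySem.Chars.strip l.toList == pfx.toList) := by
    rw [Bool.eq_iff_iff]
    simp only [beq_iff_eq, ← PySem.Str.toList_strip]
    exact ⟨fun he => by rw [he], fun he => String.toList_inj.mp he⟩
  rw [hbe]
  cases hc : PySem.Chars.startswith (PySem.Chars.strip l.toList) (pfx.toList ++ " SPDX-FileCopyrightText:".toList) with
  | false => simp
  | true => rw [pvSubsumed _ _ hc]; simp

theorem pvBound_eq (pfx : String) (i : Int) (ls : List String) :
    pvBoundA pfx i ls = pvBoundC pfx.toList i (ls.map String.toList) := by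
  induction ls generalizing i with
  | nil => rfl
  | cons l ls ih => simp [pvBoundA, pvBoundC, pvPredEq, ih]

-- invariant of splitlines.go: no produced piece contains a newline
theorem pvGo_inv (isB : Char → Bool) (hB : isB '\n' = true) (s : List Char) :
    ∀ (cur : List Char) (acc : List (List Char)), (∀ l ∈ acc, '\n' ∉ l) → ('\n' ∉ cur) →
    ∀ l ∈ PySem.Chars.splitlines.go isB s cur acc, '\n' ∉ l := by
  intro cur acc
  induction s, cur, acc using PySem.Chars.splitlines.go.induct (isB := isB) with
  | case1 cur acc hemp =>
    intro hacc hcur l hl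
    rw [PySem.Chars.splitlines.go.eq_1, if_pos hemp] at hl
    exact hacc l (List.mem_reverse.mp hl)
  | case2 cur acc hemp =>
    intro hacc hcur l hl
    rw [PySem.Chars.splitlines.go.eq_1, if_neg hemp] at hl
    rw [List.mem_reverse] at hl
    rcases List.mem_cons.mp hl with hl | hl
    · subst hl; simpa using hcur
    · exact hacc l hl
  | case3 rest cur acc ih =>
    intro hacc hcur l hl
    rw [PySem.Chars.splitlines.go.eq_2] at hl
    refine ih ?_ (by simp) l hl
    intro l' hl'
    rcases List.mem_cons.mp hl' with hl' | hl'
    · subst hl'; simpa using hcur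
    · exact hacc l' hl'
  | case4 c rest cur acc hside hc ih =>
    intro hacc hcur l hl
    rw [PySem.Chars.splitlines.go.eq_3 _ _ _ _ _ hside, if_pos hc] at hl
    refine ih ?_ (by simp) l hl
    intro l' hl'
    rcases List.mem_cons.mp hl' with hl' | hl'
    · subst hl'; simpa using hcur
    · exact hacc l' hl'
  | case5 c rest cur acc hside hc ih =>
    intro hacc hcur l hl
    rw [PySem.Chars.splitlines.go.eq_3 _ _ _ _ _ hside, if_neg hc] at hl
    refine ih hacc ?_ l hl
    intro hmem
    rcases List.mem_cons.mp hmem with he | hm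
    · rw [← he] at hc; simp [hB] at hc
    · exact hcur hm

-- splitlines pieces contain no newline
theorem pvSplitlines_nlfree (cs : List Char) :
    ∀ l ∈ PySem.Chars.splitlines cs, '\n' ∉ l := by
  rw [PySem.Chars.splitlines]
  exact pvGo_inv _ (by decide) cs [] [] (by simp) (by simp)

-- find "\n" on a newline-free string
theorem pvFind_none (s : List Char) (h : '\n' ∉ s) : PySem.Chars.find s ['\n'] = -1 := by
  rw [PySem.Chars.find_eq_neg_one_iff, List.singleton_infix_iff]
  exact h

-- a singleton pattern is a prefix of s.drop i iff s[i] is that character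
theorem pvPrefixIff (s : List Char) (i : Nat) : (['\n'] <+: s.drop i) ↔ s[i]? = some '\n' := by
  rw [← List.head?_drop]
  cases s.drop i with
  | nil => simp
  | cons a t => simp [List.cons_prefix_cons]; exact comm

theorem pvFind_append (l r : List Char) (h : '\n' ∉ l) :
    PySem.Chars.find (l ++ '\n' :: r) ['\n'] = (l.length : Int) := by
  set s := l ++ '\n' :: r with hs
  have hpos : 0 ≤ PySem.Chars.find s ['\n'] := by
    rw [PySem.Chars.find_nonneg_iff, List.singleton_infix_iff]
    simp [hs]
  obtain ⟨hpre, hmin⟩ := PySem.Chars.find_spec hpos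
  set j := (PySem.Chars.find s ['\n']).toNat with hj
  have hget : s[j]? = some '\n' := (pvPrefixIff s j).mp hpre
  have hLget : s[l.length]? = some '\n' := by
    rw [hs, List.getElem?_append_right (le_refl _)]
    simp
  have hle : j ≤ l.length := by
    by_contra hgt
    exact hmin l.length (by omega) ((pvPrefixIff s l.length).mpr hLget)
  have hej : j = l.length := by
    rcases Nat.lt_or_ge j l.length with hlt | hge
    · exfalso
      rw [hs, List.getElem?_append_left hlt] at hget
      exact h (List.mem_of_getElem? hget)
    · omega
  omega

-- a stripped line is empty iff the whole line is whitespace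
theorem pvStripEmpty (l : List Char) :
    (PySem.Chars.strip l = [] ) ↔ l.all PySem.Chars.isspace = true := by
  simp only [PySem.Chars.strip, PySem.Chars.rstrip, PySem.Chars.lstrip]
  rw [List.reverse_eq_nil_iff, List.dropWhile_eq_nil_iff]
  simp only [List.mem_reverse, List.all_eq_true]
  constructor
  · intro hd c hc
    rw [← List.takeWhile_append_dropWhile (p := PySem.Chars.isspace) (l := l)] at hc
    rcases List.mem_append.mp hc with h1 | h2
    · exact List.mem_takeWhile_imp h1
    · exact hd c h2
  · intro hall c hc
    exact hall c (List.dropWhile_subset _ hc)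

-- phase 1: peeling header lines off the joined string = dropping the leading header run
theorem pvPeel_eq (pfx : List Char) (ls : List (List Char)) (i : Int)
    (h : ∀ l ∈ ls, '\n' ∉ l) :
    pvPeelB pfx i (PySem.Chars.join ['\n'] ls)
      = PySem.Chars.join ['\n'] (ls.drop (pvBoundC pfx i ls)) := by
  induction ls generalizing i with
  | nil => simp [PySem.Chars.join_nil, pvPeelB, pvBoundC]
  | cons l ls ih =>
    cases ls with
    | nil =>
      rw [PySem.Chars.join_singleton]
      cases l with
      | nil =>
        rw [pvPeelB]
        simp only [List.isEmpty_nil, if_true]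
        cases hdr : pvHdrC pfx i [] with
        | true => simp [pvBoundC, hdr, PySem.Chars.join_nil]
        | false => simp [pvBoundC, hdr, PySem.Chars.join_singleton]
      | cons c t =>
        rw [pvPeelB]
        have hnl : PySem.Chars.find (c :: t) ['\n'] = -1 :=
          pvFind_none _ (h (c :: t) (by simp))
        have hlt : ((-1 : Int) < 0) := by decide
        rw [if_neg (by simp)]
        simp only [hnl]
        rw [if_pos hlt]
        cases hdr : pvHdrC pfx i (c :: t) with
        | true =>
          rw [if_pos (by simpa [pvHdrC] using hdr)]
          simp [pvBoundC, hdr, PySem.Chars.join_nil]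
        | false =>
          rw [if_neg (by simpa [pvHdrC] using hdr)]
          simp [pvBoundC, hdr, PySem.Chars.join_singleton]
    | cons l2 ls2 =>
      have hjoin : PySem.Chars.join ['\n'] (l :: l2 :: ls2)
          = l ++ '\n' :: PySem.Chars.join ['\n'] (l2 :: ls2) := by
        rw [PySem.Chars.join_cons_cons]
        simp
      rw [hjoin, pvPeelB]
      have hne : (l ++ '\n' :: PySem.Chars.join ['\n'] (l2 :: ls2)).isEmpty = false := by
        simp
      rw [if_neg (by simp [hne])]
      have hfind : PySem.Chars.find (l ++ '\n' :: PySem.Chars.join ['\n'] (l2 :: ls2)) ['\n']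
          = (l.length : Int) := pvFind_append _ _ (h l (by simp))
      simp only [hfind]
      have hge : ¬((l.length : Int) < 0) := by omega
      rw [if_neg hge]
      have htake : PySem.Chars.slice (l ++ '\n' :: PySem.Chars.join ['\n'] (l2 :: ls2)) none (some (l.length : Int)) = l := by
        rw [PySem.Chars.slice_eq_listSlice, PySem.List.slice_to_natCast, List.take_left]
      have hdrop : PySem.Chars.slice (l ++ '\n' :: PySem.Chars.join ['\n'] (l2 :: ls2)) (some ((l.length : Int) + 1)) none
          = PySem.Chars.join ['\n'] (l2 :: ls2) := by
        rw [PySem.Chars.slice_eq_listSlice,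
          show (l.length : Int) + 1 = ((l.length + 1 : Nat) : Int) from by push_cast; ring,
          PySem.List.slice_from_natCast,
          show l ++ '\n' :: PySem.Chars.join ['\n'] (l2 :: ls2) = (l ++ ['\n']) ++ PySem.Chars.join ['\n'] (l2 :: ls2) from by simp,
          show l.length + 1 = (l ++ ['\n']).length from by simp,
          List.drop_left]
      rw [htake, hdrop]
      cases hdr : pvHdrC pfx i l with
      | true =>
        rw [if_pos (by simpa [pvHdrC] using hdr)]
        rw [ih (i + 1) (fun l' hl' => h l' (by simp [hl']))]
        simp [pvBoundC, hdr]
      | false =>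
        rw [if_neg (by simpa [pvHdrC] using hdr)]
        rw [← hjoin]
        simp [pvBoundC, hdr]

-- the backward scan over a newline-free region returns 0
theorem pvBackB_zero (s : List Char) (p : Nat) (h : ∀ j < p, s[j]? ≠ some '\n') :
    pvBackB s p = 0 := by
  induction p with
  | zero => rfl
  | succ q ih =>
    rw [pvBackB, if_neg (by simpa using h q (by omega))]
    exact ih fun j hj => h j (by omega)

-- the backward scan restarted past a newline separator
theorem pvBackB_shift (l r : List Char) (t : Nat) :
    pvBackB (l ++ '\n' :: r) (l.length + 1 + t) = l.length + 1 + pvBackB r t := by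
  induction t with
  | zero =>
    show pvBackB (l ++ '\n' :: r) (l.length + 1) = l.length + 1 + 0
    simp [pvBackB]
  | succ q ih =>
    have he : l.length + 1 + (q + 1) = (l.length + 1 + q) + 1 := by omega
    have hg : (l ++ '\n' :: r)[l.length + 1 + q]? = r[q]? := by
      rw [show l.length + 1 + q = l.length + (q + 1) from by omega,
        List.getElem?_append_right (Nat.le_add_right _ _)]
      simp
    rw [he]
    by_cases hq : r[q]? = some '\n'
    · simp [pvBackB, hg, hq]
      omega
    · simp only [pvBackB, hg]
      rw [if_neg (by simpa using hq), if_neg (by simpa using hq), ih]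

-- all-whitespace pieces join to an all-whitespace string
theorem pvJoinAllSpace (ls : List (List Char))
    (h : ∀ l ∈ ls, l.all PySem.Chars.isspace = true) :
    (PySem.Chars.join ['\n'] ls).all PySem.Chars.isspace = true := by
  induction ls with
  | nil => simp [PySem.Chars.join_nil]
  | cons l ls ih =>
    cases ls with
    | nil => rw [PySem.Chars.join_singleton]; exact h l (by simp)
    | cons l2 ls2 =>
      rw [PySem.Chars.join_cons_cons, List.all_append, List.all_append]
      refine Bool.and_eq_true_iff.mpr ⟨Bool.and_eq_true_iff.mpr ⟨h l (by simp), by decide⟩, ?_⟩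
      exact ih (fun l' hl' => h l' (by simp [hl']))

-- every character of a piece occurs in the join
theorem pvJoinMem (ls : List (List Char)) (l : List Char) (hl : l ∈ ls) (c : Char)
    (hc : c ∈ l) : c ∈ PySem.Chars.join ['\n'] ls := by
  induction ls with
  | nil => simp at hl
  | cons l1 ls ih =>
    cases ls with
    | nil =>
      rw [PySem.Chars.join_singleton]
      rcases List.mem_cons.mp hl with he | hm
      · subst he; exact hc
      · simp at hm
    | cons l2 ls2 =>
      rw [PySem.Chars.join_cons_cons]
      rcases List.mem_cons.mp hl with he | hm
      · subst he; exact List.mem_append.mpr (Or.inl (List.mem_append.mpr (Or.inl hc)))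
      · exact List.mem_append.mpr (Or.inr (ih hm))

-- a string that is not all whitespace has a whitespace run shorter than itself
theorem pvTWlt (cs : List Char) (h : ¬ cs.all PySem.Chars.isspace = true) :
    (cs.takeWhile PySem.Chars.isspace).length < cs.length := by
  rcases Nat.lt_or_ge (cs.takeWhile PySem.Chars.isspace).length cs.length with hlt | hge
  · exact hlt
  · exfalso
    have hlen : (cs.takeWhile PySem.Chars.isspace).length = cs.length :=
      Nat.le_antisymm ((List.takeWhile_sublist _).length_le) hge
    have := (List.takeWhile_prefix (p := PySem.Chars.isspace) (l := cs)).eq_of_length hlen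
    exact h (by rw [List.all_eq_true]; exact (List.takeWhile_eq_self_iff).mp this)

-- phase 2: whitespace-run arithmetic = dropping lines before the first non-blank one
theorem pvPhase2_eq (ls : List (List Char)) (h : ∀ l ∈ ls, '\n' ∉ l) :
    (let cs := PySem.Chars.join ['\n'] ls
     let p := (cs.takeWhile PySem.Chars.isspace).length
     if p = cs.length then cs else cs.drop (pvBackB cs p))
      = PySem.Chars.join ['\n']
          (ls.drop ((ls.findIdx? (fun l => !(PySem.Chars.strip l).isEmpty)).getD 0)) := by
  induction ls with
  | nil => simp [PySem.Chars.join_nil]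
  | cons l ls ih =>
    simp only []
    by_cases hbl : PySem.Chars.strip l = []
    case neg =>
      -- first line is non-blank: nothing is dropped, and the backward scan returns 0
      have hfi : (l :: ls).findIdx? (fun l => !(PySem.Chars.strip l).isEmpty) = some 0 := by
        rw [List.findIdx?_cons, if_pos (by simpa using hbl)]
      have hnall : ¬ l.all PySem.Chars.isspace = true := fun hc => hbl ((pvStripEmpty l).mpr hc)
      have htwl : (l.takeWhile PySem.Chars.isspace).length < l.length := by
        rcases Nat.lt_or_ge (l.takeWhile PySem.Chars.isspace).length l.length with hlt | hge
        · exact hlt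
        · exfalso
          have hlen : (l.takeWhile PySem.Chars.isspace).length = l.length :=
            Nat.le_antisymm ((List.takeWhile_sublist _).length_le) hge
          have := (List.takeWhile_prefix (p := PySem.Chars.isspace) (l := l)).eq_of_length hlen
          exact hnall (by rw [List.all_eq_true]; exact (List.takeWhile_eq_self_iff).mp this)
      -- the head line is a prefix of the joined string
      obtain ⟨r, hr1, hr2, hr3⟩ :
          (∃ r, PySem.Chars.join ['\n'] (l :: ls) = l ++ r ∧
            ((l ++ r).takeWhile PySem.Chars.isspace).length = (l.takeWhile PySem.Chars.isspace).length ∧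
            l.length ≤ (l ++ r).length) := by
        cases ls with
        | nil => exact ⟨[], by rw [PySem.Chars.join_singleton]; simp, by simp, by simp⟩
        | cons l2 ls2 =>
          refine ⟨'\n' :: PySem.Chars.join ['\n'] (l2 :: ls2), ?_, ?_, by simp⟩
          · rw [PySem.Chars.join_cons_cons]; simp
          · rw [List.takeWhile_append, if_neg (by omega)]
      rw [hfi, hr1]
      rw [if_neg (by rw [hr2]; omega)]
      have hback : pvBackB (l ++ r) ((l ++ r).takeWhile PySem.Chars.isspace).length = 0 := by
        apply pvBackB_zero
        intro j hj hc
        have hjl : j < l.length := by omega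
        rw [List.getElem?_append_left hjl] at hc
        exact h l (by simp) (List.mem_of_getElem? hc)
      rw [hback]
      exact hr1.symm
    case pos =>
      have hall : l.all PySem.Chars.isspace = true := (pvStripEmpty l).mp hbl
      have hfi : (l :: ls).findIdx? (fun l => !(PySem.Chars.strip l).isEmpty)
          = (ls.findIdx? (fun l => !(PySem.Chars.strip l).isEmpty)).map (· + 1) := by
        rw [List.findIdx?_cons, if_neg (by simpa using hbl)]
      cases ls with
      | nil =>
        rw [PySem.Chars.join_singleton]
        have htw : l.takeWhile PySem.Chars.isspace = l :=
          List.takeWhile_eq_self_iff.mpr (List.all_eq_true.mp hall)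
        rw [htw, if_pos rfl, hfi]
        simp [PySem.Chars.join_singleton]
      | cons l2 ls2 =>
        have hjoin : PySem.Chars.join ['\n'] (l :: l2 :: ls2)
            = l ++ '\n' :: PySem.Chars.join ['\n'] (l2 :: ls2) := by
          rw [PySem.Chars.join_cons_cons]; simp
        set cs' := PySem.Chars.join ['\n'] (l2 :: ls2) with hcs'
        have htwl : l.takeWhile PySem.Chars.isspace = l :=
          List.takeWhile_eq_self_iff.mpr (List.all_eq_true.mp hall)
        have htw : (l ++ '\n' :: cs').takeWhile PySem.Chars.isspace
            = l ++ '\n' :: cs'.takeWhile PySem.Chars.isspace := by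
          rw [List.takeWhile_append, if_pos (by rw [htwl])]
          simp [show PySem.Chars.isspace '\n' = true from by decide]
        rw [hjoin, htw, hfi]
        cases hfo : List.findIdx? (fun l => !(PySem.Chars.strip l).isEmpty) (l2 :: ls2) with
        | none =>
          have hallrest : ∀ l' ∈ l2 :: ls2, l'.all PySem.Chars.isspace = true := by
            intro l' hl'
            have := List.findIdx?_eq_none_iff.mp hfo l' hl'
            exact (pvStripEmpty l').mp (by simpa using this)
          have hcsall : cs'.all PySem.Chars.isspace = true := pvJoinAllSpace _ hallrest
          have htwcs : cs'.takeWhile PySem.Chars.isspace = cs' :=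
            List.takeWhile_eq_self_iff.mpr (List.all_eq_true.mp hcsall)
          rw [htwcs, if_pos rfl]
          simp [← hjoin]
        | some m =>
          have hnall : ¬ cs'.all PySem.Chars.isspace = true := by
            intro hcall
            have hm := List.findIdx?_eq_some_iff_findIdx_eq.mp hfo
            have hmem : ∃ x ∈ l2 :: ls2, (!(PySem.Chars.strip x).isEmpty) = true := by
              have := List.findIdx?_eq_some_iff_getElem.mp hfo
              obtain ⟨hlt, hp, _⟩ := this
              exact ⟨(l2 :: ls2)[m], List.getElem_mem _, hp⟩
            obtain ⟨x, hx, hpx⟩ := hmem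
            have hxs : PySem.Chars.strip x ≠ [] := by simpa using hpx
            apply hxs
            rw [pvStripEmpty]
            rw [List.all_eq_true]
            intro c hc
            exact List.all_eq_true.mp hcall c (pvJoinMem _ x hx c hc)
          have hlt' := pvTWlt cs' hnall
          rw [if_neg (by simp; omega)]
          have hp : (l ++ '\n' :: cs'.takeWhile PySem.Chars.isspace).length
              = (l ++ ['\n']).length + (cs'.takeWhile PySem.Chars.isspace).length := by
            simp
            omega
          have hsplit : l ++ '\n' :: cs' = (l ++ ['\n']) ++ cs' := by simp
          have hshift : pvBackB (l ++ '\n' :: cs') (l.length + 1 + (cs'.takeWhile PySem.Chars.isspace).length)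
              = l.length + 1 + pvBackB cs' (cs'.takeWhile PySem.Chars.isspace).length :=
            pvBackB_shift l cs' _
          rw [show (l ++ '\n' :: cs'.takeWhile PySem.Chars.isspace).length
              = l.length + 1 + (cs'.takeWhile PySem.Chars.isspace).length from by simp; omega]
          rw [hshift]
          rw [show l.length + 1 + pvBackB cs' (cs'.takeWhile PySem.Chars.isspace).length
              = (l ++ ['\n']).length + pvBackB cs' (cs'.takeWhile PySem.Chars.isspace).length from by simp]
          rw [hsplit, List.drop_length_add_append]
          have hih := ih (fun l' hl' => h l' (by simp [hl']))
          rw [hfo] at hih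
          simp only at hih
          rw [if_neg (by omega)] at hih
          rw [hih]
          simp
  

-- ===== VERDICT (by name: the statement is the Claim_ definition above) =====
theorem remove_existing_reuse_header_spec : Claim_equal_remove_existing_reuse_header := by
  intro content pfx _
  simp only [Spec_remove_existing_reuse_header, remove_existing_reuse_header,
    remove_existing_reuse_header_alt]
  -- char-level lines
  have hlines : PySem.Chars.splitlines content.toList
      = (PySem.Str.splitlines content).map String.toList :=
    (PySem.Str.splitlines_map_toList content).symm
  have hnl : ∀ l ∈ PySem.Chars.splitlines content.toList, '\n' ∉ l :=
    pvSplitlines_nlfree content.toList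
  -- A's loop result
  rw [pvStepA_true, List.nil_append, pvFirstContent_eq]
  -- B's peel = drop of the header run
  rw [pvPeel_eq pfx.toList _ 0 hnl]
  rw [hlines] at hnl ⊢
  rw [← pvBound_eq pfx 0 (PySem.Str.splitlines content), ← List.map_drop]
  set cleaned := (PySem.Str.splitlines content).drop
      (pvBoundA pfx 0 (PySem.Str.splitlines content)) with hcl
  -- B's phase 2
  have hnl2 : ∀ l ∈ cleaned.map String.toList, '\n' ∉ l := by
    intro l hl
    exact hnl l (by
      rcases List.mem_map.mp hl with ⟨x, hx, hxe⟩
      exact List.mem_map.mpr ⟨x, List.mem_of_mem_drop hx, hxe⟩)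
  have hp : (PySem.Chars.join ['\n'] (cleaned.map String.toList)).length
        - (PySem.Chars.lstrip (PySem.Chars.join ['\n'] (cleaned.map String.toList))).length
      = ((PySem.Chars.join ['\n'] (cleaned.map String.toList)).takeWhile PySem.Chars.isspace).length := by
    have := congrArg List.length
      (List.takeWhile_append_dropWhile (p := PySem.Chars.isspace)
        (l := PySem.Chars.join ['\n'] (cleaned.map String.toList)))
    rw [List.length_append] at this
    simp only [PySem.Chars.lstrip]
    omega
  rw [hp, ← apply_ite String.ofList]
  have h2 := pvPhase2_eq (cleaned.map String.toList) hnl2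
  simp only at h2
  rw [h2]
  -- align the two first-non-blank indices
  have hidx : (cleaned.map String.toList).findIdx? (fun l => !(PySem.Chars.strip l).isEmpty)
      = cleaned.findIdx? (fun l => !(PySem.Str.strip l).toList.isEmpty) := by
    rw [List.findIdx?_map]
    congr 1
    funext l
    simp [Function.comp, PySem.Str.toList_strip]
  rw [hidx, ← List.map_drop]
  have hjoinS : ∀ X : List String,
      PySem.Str.join "\n" X = String.ofList (PySem.Chars.join ['\n'] (X.map String.toList)) := by
    intro X
    apply String.toList_inj.mp
    rw [PySem.Str.toList_join]
    simp
  -- compare the final strings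
  cases hfe : cleaned.findIdx? (fun l => !(PySem.Str.strip l).toList.isEmpty) with
  | none =>
    simp only [Option.getD_none]
    cases hce : cleaned with
    | nil => simp [PySem.Chars.join_nil]
    | cons a b =>
      rw [if_neg (by simp), hjoinS]
  | some j =>
    simp only [Option.getD_some]
    cases hce : cleaned with
    | nil => simp [PySem.Chars.join_nil]
    | cons a b =>
      rw [if_neg (by simp), hjoinS]
      simp
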